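-- pv_equiv track=rewrite | github.com/JKHira/sdsl2_coder | L2_builder/ssot_kernel_coverage_check.py | _decode_json_pointer
-- ===== SOURCE A (Python) =====
-- def _decode_json_pointer(pointer: str) -> list[str] | None:
--     if pointer == "/":
--         return []
--     if not pointer.startswith("/"):
--         return None
--     parts = pointer.split("/")[1:]
--     decoded: list[str] = []
--     for part in parts:
--         if "~" in part:
--             i = 0
--             while i < len(part):
--                 if part[i] != "~":
--                     i += 1
--                     continue
--                 if i + 1 >= len(part) or part[i + 1] not in {"0", "1"}:
--                     return None
--                 i += 2
--             part = part.replace("~1", "/").replace("~0", "~")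
--         decoded.append(part)
--     return decoded
-- ===== SOURCE B (Python) =====
-- def _decode_json_pointer(pointer: str) -> list[str] | None:
--     if pointer == "/":
--         return []
--     if not pointer.startswith("/"):
--         return None
--     segs: list[str] = []
--     cur: list[str] = []
--     i = 1
--     n = len(pointer)
--     while i < n:
--         c = pointer[i]
--         if c == "/":
--             segs.append("".join(cur))
--             cur = []
--             i += 1
--         elif c == "~":
--             if i + 1 >= n:
--                 return None
--             nc = pointer[i + 1]
--             if nc == "0":
--                 cur.append("~")
--             elif nc == "1":
--                 cur.append("/")
--             else:
--                 return None
--             i += 2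
--         else:
--             cur.append(c)
--             i += 1
--     segs.append("".join(cur))
--     return segs
-- ===== Notes on version B (the rewrite author's own statement) =====
-- stated objective: alternative
-- what changed: Replaces A's split('/') followed by a per-segment pipeline (a '~' membership test, an index-based validation while-loop, then two sequential str.replace passes) with one left-to-right scan of the whole pointer that splits on '/', validates each '~' escape and emits the decoded character in a single fused pass with no splitting or replace passes.
import Mathlib
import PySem

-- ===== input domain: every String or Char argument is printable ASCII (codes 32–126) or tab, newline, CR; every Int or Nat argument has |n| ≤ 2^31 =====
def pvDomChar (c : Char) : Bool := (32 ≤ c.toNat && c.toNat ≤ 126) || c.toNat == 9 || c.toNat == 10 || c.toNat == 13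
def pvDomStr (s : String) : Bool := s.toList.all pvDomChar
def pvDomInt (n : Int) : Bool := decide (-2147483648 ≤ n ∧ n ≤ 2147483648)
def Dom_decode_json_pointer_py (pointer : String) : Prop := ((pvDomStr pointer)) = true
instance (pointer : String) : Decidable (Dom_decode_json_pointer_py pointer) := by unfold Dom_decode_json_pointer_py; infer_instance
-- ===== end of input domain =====

-- B replaces A's split('/') plus per-segment validation loop and two str.replace passes
-- with one left-to-right scan of the whole pointer that splits, validates and decodes at
-- once (alternative decomposition; same return value everywhere).

-- ===== PORT A =====
-- A's inner while-loop over index i: step by 1 on a non-'~' char, check the next char and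
-- step by 2 on '~'; returns false exactly where A returns None from inside the loop.
def pvCheckTilde : List Char → Bool
  | [] => true
  | c :: rest =>
    if c ≠ '~' then pvCheckTilde rest
    else match rest with
      | [] => false
      | d :: rest' => if d = '0' ∨ d = '1' then pvCheckTilde rest' else false

-- part.replace("~1", "/").replace("~0", "~")
def pvDecodedA (part : List Char) : List Char :=
  PySem.Chars.replace (PySem.Chars.replace part ['~', '1'] ['/']) ['~', '0'] ['~']

-- A's 'for part in parts' loop with accumulator 'decoded'; none = A's early 'return None'.
def pvLoopA : List (List Char) → List (List Char) → Option (List (List Char))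
  | [], decoded => some decoded
  | part :: rest, decoded =>
    if PySem.Chars.isIn ['~'] part then
      if pvCheckTilde part then pvLoopA rest (decoded ++ [pvDecodedA part]) else none
    else pvLoopA rest (decoded ++ [part])

def decode_json_pointer_py (pointer : String) : Option (List String) :=
  if pointer == "/" then some []
  else if !(PySem.Str.startswith pointer "/") then none
  else
    let parts := PySem.List.slice (PySem.Chars.splitOn pointer.toList ['/']) (some 1) none
    (pvLoopA parts []).map (fun l => l.map (fun cs => String.ofList cs))

-- ===== PORT B =====
-- B's while-loop over the characters of pointer from index 1: 'cur' is the segment being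
-- built (already decoded), 'segs' the finished segments; '/' closes a segment, '~' consumes
-- two characters, anything else is copied.
def pvScanB : List Char → List Char → List (List Char) → Option (List (List Char))
  | [], cur, segs => some (segs ++ [cur])
  | c :: rest, cur, segs =>
    if c = '/' then pvScanB rest [] (segs ++ [cur])
    else if c = '~' then
      match rest with
      | [] => none
      | d :: rest' =>
        if d = '0' then pvScanB rest' (cur ++ ['~']) segs
        else if d = '1' then pvScanB rest' (cur ++ ['/']) segs
        else none
    else pvScanB rest (cur ++ [c]) segs

def decode_json_pointer_py_alt (pointer : String) : Option (List String) :=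
  if pointer == "/" then some []
  else if !(PySem.Str.startswith pointer "/") then none
  else
    (pvScanB (pointer.toList.drop 1) [] []).map (fun l => l.map (fun cs => String.ofList cs))

-- ===== PRECONDITION & SPEC =====
def Spec_decode_json_pointer_py (pointer : String) (out : Option (List String)) : Prop := out = decode_json_pointer_py_alt pointer
instance (pointer : String) (out : Option (List String)) : Decidable (Spec_decode_json_pointer_py pointer out) := by unfold Spec_decode_json_pointer_py; infer_instance

-- ===== CLAIM =====
def Claim_equal_decode_json_pointer_py : Prop := ∀ (pointer : String), Dom_decode_json_pointer_py pointer → Spec_decode_json_pointer_py pointer (decode_json_pointer_py pointer)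

-- ===== LEMMAS AND PROOFS =====

-- clean recursive characterization of str.split on the single character '/'
def pvSp : List Char → List (List Char)
  | [] => [[]]
  | a :: t => if a = '/' then [] :: pvSp t else (pvSp t).modifyHead (a :: ·)

lemma pv_sp_ne_nil : ∀ t, pvSp t ≠ [] := by
  intro t
  induction t with
  | nil => simp [pvSp]
  | cons a t ih =>
    simp only [pvSp]
    split
    · simp
    · cases h : pvSp t with
      | nil => exact absurd h ih
      | cons p ps => simp [List.modifyHead]

lemma pv_splitOn_go : ∀ fuel l, List.length l ≤ fuel → ∀ cur acc,
    PySem.Chars.splitOn.go ['/'] fuel l cur acc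
      = acc.reverse ++ (pvSp l).modifyHead (cur.reverse ++ ·) := by
  intro fuel
  induction fuel with
  | zero =>
    intro l hl cur acc
    have : l = [] := List.eq_nil_of_length_eq_zero (Nat.le_zero.mp hl)
    subst this
    simp [PySem.Chars.splitOn.go, pvSp, List.modifyHead]
  | succ fuel ih =>
    intro l hl cur acc
    cases l with
    | nil => simp [PySem.Chars.splitOn.go, pvSp, List.modifyHead]
    | cons c rest =>
      have hr : rest.length ≤ fuel := by simp only [List.length_cons] at hl; omega
      by_cases hc : c = '/'
      · subst hc
        have hpre : List.isPrefixOf ['/'] ('/' :: rest) = true := by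
          simp [List.isPrefixOf]
        simp only [PySem.Chars.splitOn.go, hpre, if_true, List.length_singleton,
          List.drop_one, List.tail_cons]
        rw [ih rest hr [] (cur.reverse :: acc)]
        simp only [pvSp, if_true, List.modifyHead, List.reverse_cons, List.reverse_nil,
          List.nil_append, List.append_assoc, List.singleton_append]
        cases h : pvSp rest <;> simp
      · have hpre : List.isPrefixOf ['/'] (c :: rest) = false := by
          simp [List.isPrefixOf, Ne.symm hc]
        simp only [PySem.Chars.splitOn.go, hpre, Bool.false_eq_true, if_false]
        rw [ih rest hr (c :: cur) acc]
        simp only [pvSp, hc, if_false, List.reverse_cons]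
        obtain ⟨p, ps, hps⟩ : ∃ p ps, pvSp rest = p :: ps := by
          cases h : pvSp rest with
          | nil => exact absurd h (pv_sp_ne_nil rest)
          | cons p ps => exact ⟨p, ps, rfl⟩
        rw [hps]
        simp [List.modifyHead]
        

lemma pv_splitOn_eq (l : List Char) : PySem.Chars.splitOn l ['/'] = pvSp l := by
  show PySem.Chars.splitOn.go ['/'] (l.length + 1) l [] [] = pvSp l
  rw [pv_splitOn_go (l.length + 1) l (by omega) [] []]
  cases h : pvSp l <;> simp [List.modifyHead]

-- replace.go: accumulator lemma
lemma pv_go_acc (old new : List Char) :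
    ∀ n (l acc : List Char),
      PySem.Chars.replace.go old new n l acc = acc.reverse ++ PySem.Chars.replace.go old new n l [] := by
  intro n
  induction n with
  | zero => intro l acc; simp [PySem.Chars.replace.go]
  | succ n ih =>
    intro l acc
    cases l with
    | nil => simp [PySem.Chars.replace.go]
    | cons c t =>
      simp only [PySem.Chars.replace.go]
      split
      · rw [ih _ (new.reverse ++ acc), ih _ (new.reverse ++ [])]
        simp
      · rw [ih t (c :: acc), ih t [c]]
        simp

-- replace.go: fuel independence above the list length
lemma pv_go_fuel (old new : List Char) (hold : old ≠ []) :
    ∀ n m (l : List Char), l.length ≤ n → l.length ≤ m →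
      PySem.Chars.replace.go old new n l [] = PySem.Chars.replace.go old new m l [] := by
  intro n
  induction n with
  | zero =>
    intro m l hl _
    have : l = [] := List.eq_nil_of_length_eq_zero (Nat.le_zero.mp hl)
    subst this
    cases m <;> rfl
  | succ n ih =>
    intro m l hl hm
    cases l with
    | nil => cases m <;> simp [PySem.Chars.replace.go]
    | cons c t =>
      cases m with
      | zero => simp at hm
      | succ m' =>
        have hlen : old.length ≥ 1 := by
          cases old with
          | nil => exact absurd rfl hold
          | cons _ _ => simp
        have hdrop : (List.drop old.length (c :: t)).length ≤ t.length := by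
          simp only [List.length_drop, List.length_cons]; omega
        have htn : t.length ≤ n := by simp only [List.length_cons] at hl; omega
        have htm : t.length ≤ m' := by simp only [List.length_cons] at hm; omega
        simp only [PySem.Chars.replace.go]
        split
        · rw [pv_go_acc old new n, pv_go_acc old new m']
          rw [ih m' _ (le_trans hdrop htn) (le_trans hdrop htm)]
        · rw [pv_go_acc old new n, pv_go_acc old new m']
          rw [ih m' t htn htm]

-- replace steps over a non-matching head character
lemma pv_replace_cons (old new : List Char) (hold : old ≠ []) (c : Char) (t : List Char)
    (hpre : old.isPrefixOf (c :: t) = false) :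
    PySem.Chars.replace (c :: t) old new = c :: PySem.Chars.replace t old new := by
  have hne : old.isEmpty = false := by cases old with
    | nil => exact absurd rfl hold
    | cons _ _ => rfl
  simp only [PySem.Chars.replace, hne, Bool.false_eq_true, if_false, List.length_cons]
  simp only [PySem.Chars.replace.go, hpre, Bool.false_eq_true, if_false]
  rw [pv_go_acc]
  simp

-- replace consumes a matching prefix
lemma pv_replace_prefix (old new : List Char) (hold : old ≠ []) (l : List Char) (hl : l ≠ [])
    (hpre : old.isPrefixOf l = true) :
    PySem.Chars.replace l old new = new ++ PySem.Chars.replace (l.drop old.length) old new := by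
  have hne : old.isEmpty = false := by cases old with
    | nil => exact absurd rfl hold
    | cons _ _ => rfl
  have hlen : old.length ≥ 1 := by cases old with
    | nil => exact absurd rfl hold
    | cons _ _ => simp
  simp only [PySem.Chars.replace, hne, Bool.false_eq_true, if_false]
  cases l with
  | nil => exact absurd rfl hl
  | cons c t =>
    simp only [List.length_cons]
    simp only [PySem.Chars.replace.go, hpre, if_true]
    rw [pv_go_acc]
    have hdl : (List.drop old.length (c :: t)).length ≤ t.length := by
      simp only [List.length_drop, List.length_cons]; omega
    rw [pv_go_fuel old new hold t.length (List.drop old.length (c :: t)).length _ hdl (le_refl _)]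
    simp

-- A's per-segment branch body, as validation followed by the two replaces
def pvPartA (p : List Char) : Option (List Char) :=
  if pvCheckTilde p then some (pvDecodedA p) else none

lemma pv_check_no_tilde : ∀ p : List Char, '~' ∉ p → pvCheckTilde p = true := by
  intro p
  induction p with
  | nil => intro _; rfl
  | cons c rest ih =>
    intro h
    have hc : c ≠ '~' := fun hc => h (hc ▸ List.mem_cons_self ..)
    have hr : '~' ∉ rest := fun hm => h (List.mem_cons_of_mem _ hm)
    rw [pvCheckTilde.eq_def]
    simp [hc, ih hr]

lemma pv_decode_no_tilde : ∀ p : List Char, '~' ∉ p → pvDecodedA p = p := by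
  intro p
  induction p with
  | nil => intro _; rfl
  | cons c rest ih =>
    intro h
    have hc : c ≠ '~' := fun hc => h (hc ▸ List.mem_cons_self ..)
    have hr : '~' ∉ rest := fun hm => h (List.mem_cons_of_mem _ hm)
    unfold pvDecodedA at *
    rw [pv_replace_cons ['~', '1'] ['/'] (by simp) c rest (by simp [List.isPrefixOf, Ne.symm hc]),
        pv_replace_cons ['~', '0'] ['~'] (by simp) c (PySem.Chars.replace rest ['~', '1'] ['/'])
          (by simp [List.isPrefixOf, Ne.symm hc]),
        ih hr]

-- pvLoopA steps by pvPartA (whether or not the segment contains '~')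
lemma pv_loopA_step (p : List Char) (ps decoded : List (List Char)) :
    pvLoopA (p :: ps) decoded =
      match pvPartA p with
      | none => none
      | some d => pvLoopA ps (decoded ++ [d]) := by
  simp only [pvLoopA, pvPartA]
  cases h : PySem.Chars.isIn ['~'] p with
  | true => cases hc : pvCheckTilde p <;> simp
  | false =>
    have hmem : '~' ∉ p := by
      intro hm
      have hinf : ['~'] <:+: p := by
        obtain ⟨s, t, rfl⟩ := List.append_of_mem hm
        exact ⟨s, t, by simp⟩
      rw [(PySem.Chars.isIn_iff_infix _ _).mpr hinf] at h
      exact absurd h (by simp)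
    simp [pv_check_no_tilde p hmem, pv_decode_no_tilde p hmem]

lemma pv_loopA_acc : ∀ (ps decoded : List (List Char)),
    pvLoopA ps decoded = (pvLoopA ps []).map (decoded ++ ·) := by
  intro ps
  induction ps with
  | nil => intro decoded; simp [pvLoopA]
  | cons p ps ih =>
    intro decoded
    rw [pv_loopA_step, pv_loopA_step]
    cases h : pvPartA p with
    | none => rfl
    | some d =>
      simp only [List.nil_append]
      rw [ih (decoded ++ [d]), ih [d]]
      cases pvLoopA ps [] <;> simp

-- per-segment step lemmas for pvPartA
lemma pv_partA_nil : pvPartA [] = some [] := by decide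

lemma pv_partA_cons (c : Char) (p : List Char) (hc : c ≠ '~') :
    pvPartA (c :: p) = (pvPartA p).map (c :: ·) := by
  have hchk : pvCheckTilde (c :: p) = pvCheckTilde p := by
    rw [pvCheckTilde.eq_def]; simp [hc]
  have hdec : pvDecodedA (c :: p) = c :: pvDecodedA p := by
    unfold pvDecodedA
    rw [pv_replace_cons ['~', '1'] ['/'] (by simp) c p (by simp [List.isPrefixOf, Ne.symm hc]),
        pv_replace_cons ['~', '0'] ['~'] (by simp) c (PySem.Chars.replace p ['~', '1'] ['/'])
          (by simp [List.isPrefixOf, Ne.symm hc])]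
  unfold pvPartA
  rw [hchk, hdec]
  cases pvCheckTilde p <;> simp

lemma pv_partA_t0 (p : List Char) :
    pvPartA ('~' :: '0' :: p) = (pvPartA p).map ('~' :: ·) := by
  have hchk : pvCheckTilde ('~' :: '0' :: p) = pvCheckTilde p := rfl
  have hdec : pvDecodedA ('~' :: '0' :: p) = '~' :: pvDecodedA p := by
    unfold pvDecodedA
    rw [pv_replace_cons ['~', '1'] ['/'] (by simp) '~' ('0' :: p) (by simp [List.isPrefixOf]),
        pv_replace_cons ['~', '1'] ['/'] (by simp) '0' p (by simp [List.isPrefixOf]),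
        pv_replace_prefix ['~', '0'] ['~'] (by simp)
          ('~' :: '0' :: PySem.Chars.replace p ['~', '1'] ['/']) (by simp)
          (by simp [List.isPrefixOf])]
    simp
  unfold pvPartA
  rw [hchk, hdec]
  cases pvCheckTilde p <;> simp

lemma pv_partA_t1 (p : List Char) :
    pvPartA ('~' :: '1' :: p) = (pvPartA p).map ('/' :: ·) := by
  have hchk : pvCheckTilde ('~' :: '1' :: p) = pvCheckTilde p := rfl
  have hdec : pvDecodedA ('~' :: '1' :: p) = '/' :: pvDecodedA p := by
    unfold pvDecodedA
    rw [pv_replace_prefix ['~', '1'] ['/'] (by simp) ('~' :: '1' :: p) (by simp)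
        (by simp [List.isPrefixOf])]
    have : List.drop (['~', '1'].length) ('~' :: '1' :: p) = p := rfl
    rw [this, List.singleton_append,
      pv_replace_cons ['~', '0'] ['~'] (by simp) '/' (PySem.Chars.replace p ['~', '1'] ['/'])
        (by simp [List.isPrefixOf])]
  unfold pvPartA
  rw [hchk, hdec]
  cases pvCheckTilde p <;> simp

lemma pv_partA_tilde_nil : pvPartA ['~'] = none := by decide

lemma pv_partA_bad (d : Char) (p : List Char) (h0 : d ≠ '0') (h1 : d ≠ '1') :
    pvPartA ('~' :: d :: p) = none := by
  have hchk : pvCheckTilde ('~' :: d :: p) = false := by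
    rw [pvCheckTilde.eq_def]; simp [h0, h1]
  unfold pvPartA
  rw [hchk]
  simp

-- MAIN: B's fused scan equals A's segment-by-segment loop over pvSp
lemma pv_main : ∀ n (tail : List Char), tail.length ≤ n → ∀ cur segs,
    pvScanB tail cur segs
      = (pvLoopA (pvSp tail) []).map (fun l => segs ++ l.modifyHead (cur ++ ·)) := by
  intro n
  induction n with
  | zero =>
    intro tail h cur segs
    have : tail = [] := List.eq_nil_of_length_eq_zero (Nat.le_zero.mp h)
    subst this
    rw [show pvSp [] = [[]] from rfl, pv_loopA_step, pv_partA_nil]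
    simp [pvScanB, pvLoopA, List.modifyHead]
  | succ n ih =>
    intro tail h cur segs
    cases tail with
    | nil =>
      rw [show pvSp [] = [[]] from rfl, pv_loopA_step, pv_partA_nil]
      simp [pvScanB, pvLoopA, List.modifyHead]
    | cons c rest =>
      have hr : rest.length ≤ n := by simp only [List.length_cons] at h; omega
      obtain ⟨p, ps, hps⟩ : ∃ p ps, pvSp rest = p :: ps := by
        cases hx : pvSp rest with
        | nil => exact absurd hx (pv_sp_ne_nil rest)
        | cons p ps => exact ⟨p, ps, rfl⟩
      by_cases hc : c = '/'
      · subst hc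
        have l1 : pvScanB ('/' :: rest) cur segs = pvScanB rest [] (segs ++ [cur]) := by
          rw [pvScanB.eq_def]; simp
        rw [l1, ih rest hr [] (segs ++ [cur])]
        rw [show pvSp ('/' :: rest) = [] :: pvSp rest by simp [pvSp]]
        rw [pv_loopA_step, pv_partA_nil]
        simp only [List.nil_append]
        rw [pv_loopA_acc (pvSp rest) [[]]]
        cases pvLoopA (pvSp rest) [] with
        | none => simp
        | some l =>
          simp only [Option.map_some]
          cases l <;> simp [List.modifyHead]
      · by_cases ht : c = '~'
        · subst ht
          cases rest with
          | nil =>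
            rw [show pvScanB ['~'] cur segs = none from rfl]
            rw [show pvSp ['~'] = [['~']] by simp [pvSp, List.modifyHead]]
            rw [pv_loopA_step, pv_partA_tilde_nil]
            rfl
          | cons d rest' =>
            have hr' : rest'.length ≤ n := by simp only [List.length_cons] at h; omega
            obtain ⟨q, qs, hqs⟩ : ∃ q qs, pvSp rest' = q :: qs := by
              cases hx : pvSp rest' with
              | nil => exact absurd hx (pv_sp_ne_nil rest')
              | cons q qs => exact ⟨q, qs, rfl⟩
            by_cases h0 : d = '0'
            · subst h0
              have hsp : pvSp ('~' :: '0' :: rest') = ('~' :: '0' :: q) :: qs := by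
                simp [pvSp, hqs, List.modifyHead]
              have l1 : pvScanB ('~' :: '0' :: rest') cur segs
                  = pvScanB rest' (cur ++ ['~']) segs := by
                rw [pvScanB.eq_def]; simp
              rw [l1, ih rest' hr' (cur ++ ['~']) segs, hqs, hsp]
              rw [pv_loopA_step, pv_loopA_step, pv_partA_t0]
              cases hq : pvPartA q with
              | none => rfl
              | some e =>
                simp only [Option.map_some, List.nil_append]
                rw [pv_loopA_acc qs [e], pv_loopA_acc qs [('~' :: e)]]
                cases pvLoopA qs [] <;> simp [List.modifyHead]
            · by_cases h1 : d = '1'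
              · subst h1
                have hsp : pvSp ('~' :: '1' :: rest') = ('~' :: '1' :: q) :: qs := by
                  simp [pvSp, hqs, List.modifyHead]
                have l1 : pvScanB ('~' :: '1' :: rest') cur segs
                    = pvScanB rest' (cur ++ ['/']) segs := by
                  rw [pvScanB.eq_def]; simp
                rw [l1, ih rest' hr' (cur ++ ['/']) segs, hqs, hsp]
                rw [pv_loopA_step, pv_loopA_step, pv_partA_t1]
                cases hq : pvPartA q with
                | none => rfl
                | some e =>
                  simp only [Option.map_some, List.nil_append]
                  rw [pv_loopA_acc qs [e], pv_loopA_acc qs [('/' :: e)]]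
                  cases pvLoopA qs [] <;> simp [List.modifyHead]
              · have l1 : pvScanB ('~' :: d :: rest') cur segs = none := by
                  rw [pvScanB.eq_def]; simp [h0, h1]
                by_cases hds : d = '/'
                · subst hds
                  have hsp : pvSp ('~' :: '/' :: rest') = ['~'] :: q :: qs := by
                    simp [pvSp, hqs, List.modifyHead]
                  rw [l1, hsp, pv_loopA_step, pv_partA_tilde_nil]
                  rfl
                · have hsp : pvSp ('~' :: d :: rest') = ('~' :: d :: q) :: qs := by
                    simp [pvSp, hqs, List.modifyHead, hds]
                  rw [l1, hsp, pv_loopA_step, pv_partA_bad d q h0 h1]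
                  rfl
        · have l1 : pvScanB (c :: rest) cur segs = pvScanB rest (cur ++ [c]) segs := by
            rw [pvScanB.eq_def]; simp [hc, ht]
          rw [l1, ih rest hr (cur ++ [c]) segs]
          rw [show pvSp (c :: rest) = (pvSp rest).modifyHead (c :: ·) by simp [pvSp, hc]]
          rw [hps]
          simp only [List.modifyHead_cons]
          rw [pv_loopA_step, pv_loopA_step, pv_partA_cons c p ht]
          cases hq : pvPartA p with
          | none => rfl
          | some e =>
            simp only [Option.map_some, List.nil_append]
            rw [pv_loopA_acc ps [e], pv_loopA_acc ps [(c :: e)]]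
            cases pvLoopA ps [] <;> simp [List.modifyHead]

-- ===== VERDICT =====
theorem decode_json_pointer_py_spec : Claim_equal_decode_json_pointer_py := by
  intro pointer _
  unfold Spec_decode_json_pointer_py decode_json_pointer_py decode_json_pointer_py_alt
  by_cases h1 : pointer == "/"
  · simp [h1]
  · simp only [h1, Bool.false_eq_true, if_false]
    cases h2 : PySem.Str.startswith pointer "/" with
    | false => simp
    | true =>
      simp only [Bool.not_true, Bool.false_eq_true, if_false]
      have hpre : ['/'] <+: pointer.toList := by
        have := (PySem.Chars.startswith_iff pointer.toList ['/']).mp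
        rw [PySem.Str.startswith_eq] at h2
        exact this h2
      obtain ⟨tail, htl⟩ : ∃ tail, pointer.toList = '/' :: tail := by
        obtain ⟨t, ht⟩ := hpre
        exact ⟨t, ht.symm⟩
      rw [htl, pv_splitOn_eq, show pvSp ('/' :: tail) = [] :: pvSp tail by simp [pvSp]]
      rw [PySem.List.slice_from_one]
      rw [List.tail_cons, List.drop_one, List.tail_cons]
      rw [pv_main tail.length tail (le_refl _) [] []]
      cases pvLoopA (pvSp tail) [] with
      | none => rfl
      | some l => cases l <;> simp [List.modifyHead]
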